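-- pv_equiv track=rewrite | github.com/devurandom11/Advent-of-Code | 2017/day-1/part-1/main.py | searchInts
-- ===== SOURCE A (Python) =====
-- def searchInts(inputInts: int) -> dict:
--     solutionDict: dict = {0: 0, 1: 0, 2: 0, 3: 0, 4: 0, 5: 0, 6: 0, 7: 0, 8: 0, 9: 0}
--
--     for i in range(0, len(inputInts) - 1):
--         if inputInts[i] == inputInts[i + 1]:
--             solutionDict[int(inputInts[i])] += int(inputInts[i])
--     if inputInts[0] == inputInts[-1]:
--         solutionDict[int(inputInts[0])] += int(inputInts[0])
--     return solutionDict
-- ===== SOURCE B (Python) =====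
-- def searchInts(inputInts):
--     # run-length encode the string, then each run of a digit d with length L
--     # contributes d * (L - 1); the circular wrap contributes one more match.
--     runs = []
--     for c in inputInts:
--         if runs and runs[-1][0] == c:
--             runs[-1] = (c, runs[-1][1] + 1)
--         else:
--             runs.append((c, 1))
--     counts = {d: 0 for d in range(10)}
--     for c, length in runs:
--         if length > 1:
--             counts[int(c)] += (length - 1) * int(c)
--     if inputInts[0] == inputInts[-1]:
--         counts[int(inputInts[0])] += int(inputInts[0])
--     return counts
-- ===== Notes on version B (the rewrite author's own statement) =====
-- stated objective: alternative
-- what changed: replaces A's per-index comparison of neighbouring characters with a run-length encoding of the string: runs are built first, then each run of length L contributes digit*(L-1) to the result dict, with the circular wrap handled once at the end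
import Mathlib
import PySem

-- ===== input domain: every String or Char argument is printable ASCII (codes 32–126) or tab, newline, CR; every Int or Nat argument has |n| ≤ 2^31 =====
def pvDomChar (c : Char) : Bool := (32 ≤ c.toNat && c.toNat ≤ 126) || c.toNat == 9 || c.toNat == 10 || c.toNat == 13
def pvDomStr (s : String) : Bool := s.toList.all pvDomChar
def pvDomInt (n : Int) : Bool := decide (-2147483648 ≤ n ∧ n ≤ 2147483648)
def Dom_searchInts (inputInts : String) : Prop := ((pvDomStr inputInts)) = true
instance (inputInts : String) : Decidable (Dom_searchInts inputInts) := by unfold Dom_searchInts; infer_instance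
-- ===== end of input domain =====

-- B run-length encodes the string and lets each run of length L contribute digit*(L-1), plus one
-- wrap-around check, instead of A's per-index comparison of neighbours (objective: alternative; same cost).

-- int(c) for a one-character string c (both Pythons call it only on matched characters,
-- which Pre_ requires to be decimal digits, so the .getD 0 default is never used there)
def pvDv (c : Char) : Int := (PySem.Int.ofChars? [c]).getD 0

-- ===== PORT A =====
def searchInts (inputInts : String) : List (Int × Int) :=
  let cs := inputInts.toList
  let d0 : PySem.Dict Int Int :=
    PySem.Dict.ofList [(0,0),(1,0),(2,0),(3,0),(4,0),(5,0),(6,0),(7,0),(8,0),(9,0)]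
  -- for i in range(0, len(inputInts) - 1): …   (indices are in range, so pyGetD is exact)
  let d1 := (PySem.List.pyRange 0 ((cs.length : Int) - 1) 1).foldl
    (fun d i =>
      if PySem.List.pyGetD cs i ' ' = PySem.List.pyGetD cs (i + 1) ' ' then
        d.modify (pvDv (PySem.List.pyGetD cs i ' ')) 0 (· + pvDv (PySem.List.pyGetD cs i ' '))
      else d) d0
  -- if inputInts[0] == inputInts[-1]: …   (Pre_ requires the string nonempty, so both reads are exact)
  let d2 :=
    if PySem.List.pyGetD cs 0 ' ' = PySem.List.pyGetD cs (-1) ' ' then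
      d1.modify (pvDv (PySem.List.pyGetD cs 0 ' ')) 0 (· + pvDv (PySem.List.pyGetD cs 0 ' '))
    else d1
  d2.items

-- ===== PORT B =====
def searchInts_alt (inputInts : String) : List (Int × Int) :=
  let cs := inputInts.toList
  -- run-length encoding loop: extend the last run or start a new one
  let runs := cs.foldl (fun (runs : List (Char × Nat)) c =>
      match runs.getLast? with
      | some (c0, n) => if c0 = c then runs.dropLast ++ [(c, n + 1)] else runs ++ [(c, 1)]
      | none => runs ++ [(c, 1)]) []
  -- counts = {d: 0 for d in range(10)}
  let d0 := (PySem.List.pyRange 0 10 1).foldl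
      (fun (d : PySem.Dict Int Int) k => d.insert k 0) (PySem.Dict.ofList [])
  -- for c, length in runs: if length > 1: counts[int(c)] += (length - 1) * int(c)
  let d1 := runs.foldl (fun d (p : Char × Nat) =>
      if 1 < p.2 then d.modify (pvDv p.1) 0 (· + ((p.2 : Int) - 1) * pvDv p.1) else d) d0
  -- if inputInts[0] == inputInts[-1]: …   (nonempty by Pre_, so both reads are exact)
  let d2 := if PySem.List.pyGetD cs 0 ' ' = PySem.List.pyGetD cs (-1) ' ' then
      d1.modify (pvDv (PySem.List.pyGetD cs 0 ' ')) 0 (· + pvDv (PySem.List.pyGetD cs 0 ' '))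
    else d1
  d2.items

-- ===== PRECONDITION & SPEC =====
-- Pre_ excludes exactly the inputs where the Python A raises: the empty string (IndexError on
-- inputInts[0]) and strings where some circularly-adjacent matched character is not a decimal
-- digit (int() raises ValueError there).
def Pre_searchInts (inputInts : String) : Prop :=
  inputInts.toList ≠ [] ∧
  ∀ p ∈ inputInts.toList.zip (inputInts.toList.drop 1 ++ [inputInts.toList.getD 0 ' ']),
    p.1 = p.2 → p.1 ∈ ['0','1','2','3','4','5','6','7','8','9']
instance (inputInts : String) : Decidable (Pre_searchInts inputInts) := by
  unfold Pre_searchInts; infer_instance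
def pvWitness_searchInts : String := "91212129"

def Spec_searchInts (inputInts : String) (out : List (Int × Int)) : Prop := out = searchInts_alt inputInts
instance (inputInts : String) (out : List (Int × Int)) : Decidable (Spec_searchInts inputInts out) := by unfold Spec_searchInts; infer_instance

-- ===== CLAIM (what is proved, stated in full; the proofs are below) =====
def Claim_equal_searchInts : Prop := ∀ (inputInts : String), Dom_searchInts inputInts → Pre_searchInts inputInts → Spec_searchInts inputInts (searchInts inputInts)

-- ===== LEMMAS AND PROOFS =====

-- single modify step / proof-side views of the two loops:
-- pvMp: the matched digits of the adjacent (non-wrap) pairs, in order;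
-- pvMerge: reference recursion for B's run-building loop (extend the current run (c0, n));
-- pvFlat: the digits a run list stands for (each run of length L yields L-1 copies of its digit)
def pvOne (d : PySem.Dict Int Int) (v : Int) : PySem.Dict Int Int := d.modify v 0 (· + v)
def pvMp (cs : List Char) : List Int :=
  (cs.zip (cs.drop 1)).filterMap (fun p => if p.1 = p.2 then some (pvDv p.1) else none)
def pvMerge (c0 : Char) (n : Nat) : List Char → List (Char × Nat)
  | [] => [(c0, n)]
  | c :: rest => if c = c0 then pvMerge c0 (n + 1) rest else (c0, n) :: pvMerge c 1 rest
def pvFlat (runs : List (Char × Nat)) : List Int :=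
  runs.flatMap (fun p => List.replicate (p.2 - 1) (pvDv p.1))

lemma pv_modify_modify (d : PySem.Dict Int Int) (k : Int) (f g : Int → Int) :
    (d.modify k 0 f).modify k 0 g = d.modify k 0 (fun x => g (f x)) := by
  have h1 : (d.modify k 0 f).modify k 0 g
      = (d.modify k 0 f).insert k (g ((d.modify k 0 f).getD k 0)) := rfl
  rw [h1, PySem.Dict.getD_modify_self]
  have h2 : d.modify k 0 f = d.insert k (f (d.getD k 0)) := rfl
  rw [h2, PySem.Dict.insert_insert_self]
  rfl

lemma pv_runs_merge :
    ∀ (cs : List Char) (acc : List (Char × Nat)) (c0 : Char) (n : Nat),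
    cs.foldl (fun (runs : List (Char × Nat)) c =>
      match runs.getLast? with
      | some (c0, n) => if c0 = c then runs.dropLast ++ [(c, n + 1)] else runs ++ [(c, 1)]
      | none => runs ++ [(c, 1)]) (acc ++ [(c0, n)])
      = acc ++ pvMerge c0 n cs := by
  intro cs
  induction cs with
  | nil => intro acc c0 n; simp [pvMerge]
  | cons c rest ih =>
    intro acc c0 n
    have hlast : (acc ++ [(c0, n)]).getLast? = some (c0, n) := by simp
    by_cases h : c = c0
    · subst h
      rw [List.foldl_cons]
      have hstep : (match (acc ++ [(c, n)]).getLast? with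
          | some (c0, m) => if c0 = c then (acc ++ [(c, n)]).dropLast ++ [(c, m + 1)]
              else (acc ++ [(c, n)]) ++ [(c, 1)]
          | none => (acc ++ [(c, n)]) ++ [(c, 1)]) = acc ++ [(c, n + 1)] := by
        rw [hlast]
        simp
      rw [hstep, ih acc c (n + 1), pvMerge, if_pos rfl]
    · rw [List.foldl_cons]
      have hstep : (match (acc ++ [(c0, n)]).getLast? with
          | some (c0', m) => if c0' = c then (acc ++ [(c0, n)]).dropLast ++ [(c, m + 1)]
              else (acc ++ [(c0, n)]) ++ [(c, 1)]
          | none => (acc ++ [(c0, n)]) ++ [(c, 1)]) = (acc ++ [(c0, n)]) ++ [(c, 1)] := by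
        rw [hlast]
        simp
        exact fun hc => h hc.symm
      rw [hstep, ih (acc ++ [(c0, n)]) c 1, pvMerge, if_neg h, List.append_assoc]
      rfl

lemma pv_flat_merge :
    ∀ (cs : List Char) (c0 : Char) (n : Nat), 1 ≤ n →
    pvFlat (pvMerge c0 n cs) = List.replicate (n - 1) (pvDv c0) ++ pvMp (c0 :: cs) := by
  intro cs
  induction cs with
  | nil => intro c0 n _; simp [pvMerge, pvFlat, pvMp]
  | cons c rest ih =>
    intro c0 n hn
    by_cases h : c = c0
    · subst h
      rw [pvMerge, if_pos rfl, ih c (n + 1) (by omega)]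
      have hrep : List.replicate (n + 1 - 1) (pvDv c)
          = List.replicate (n - 1) (pvDv c) ++ [pvDv c] := by
        have h2 : n + 1 - 1 = (n - 1) + 1 := by omega
        rw [h2, List.replicate_succ']
      rw [hrep]
      have hmp : pvMp (c :: c :: rest) = pvDv c :: pvMp (c :: rest) := by
        simp [pvMp]
      rw [hmp, List.append_assoc]
      rfl
    · rw [pvMerge, if_neg h]
      have hne : ¬ (c0 = c) := fun hc => h hc.symm
      have hmp : pvMp (c0 :: c :: rest) = pvMp (c :: rest) := by
        simp [pvMp, hne]
      have hflat : pvFlat ((c0, n) :: pvMerge c 1 rest)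
          = List.replicate (n - 1) (pvDv c0) ++ pvFlat (pvMerge c 1 rest) := by
        simp [pvFlat]
      rw [hflat, ih c 1 le_rfl, hmp]
      rfl

lemma pv_one_replicate :
    ∀ (m : Nat) (d : PySem.Dict Int Int) (v : Int),
    (List.replicate (m + 1) v).foldl pvOne d = d.modify v 0 (· + ((m + 1 : Nat) : Int) * v) := by
  intro m
  induction m with
  | zero =>
    intro d v
    show pvOne d v = _
    unfold pvOne
    congr 1
    funext x
    push_cast
    ring
  | succ m ih =>
    intro d v
    rw [List.replicate_succ, List.foldl_cons, ih]
    unfold pvOne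
    rw [pv_modify_modify]
    congr 1
    funext x
    push_cast
    ring

-- an index loop over range(len-1) reading cs[i], cs[i+1] is a fold over the adjacent pairs
lemma pv_foldl_range_pairs {σ : Type} (f : σ → Char → Char → σ) :
    ∀ (cs : List Char) (init : σ),
    (List.range (cs.length - 1)).foldl (fun d k => f d (cs.getD k ' ') (cs.getD (k + 1) ' ')) init
      = (cs.zip (cs.drop 1)).foldl (fun d p => f d p.1 p.2) init := by
  intro cs
  induction cs with
  | nil => intro init; simp
  | cons c rest ih =>
    intro init
    cases rest with
    | nil => simp
    | cons c2 rest2 =>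
      have h1 : (c :: c2 :: rest2 : List Char).length - 1 = rest2.length + 1 := by simp
      rw [h1, List.range_succ_eq_map, List.foldl_cons, List.foldl_map]
      have h2 := ih (f init (List.getD (c :: c2 :: rest2) 0 ' ') (List.getD (c :: c2 :: rest2) (0 + 1) ' '))
      simp only [List.length_cons, Nat.add_sub_cancel] at h2
      simp only [List.getD_cons_succ, List.getD_cons_zero, Nat.succ_eq_add_one] at h2 ⊢
      rw [h2]
      rfl

-- a fold with an if-guard is a fold over the filterMap of its guard
lemma pv_foldl_guard :
    ∀ (l : List (Char × Char)) (d : PySem.Dict Int Int),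
    l.foldl (fun d p => if p.1 = p.2 then d.modify (pvDv p.1) 0 (· + pvDv p.1) else d) d
      = (l.filterMap (fun p => if p.1 = p.2 then some (pvDv p.1) else none)).foldl pvOne d := by
  intro l
  induction l with
  | nil => intro d; rfl
  | cons p rest ih =>
    intro d
    by_cases h : p.1 = p.2 <;> simp [h, ih, pvOne]

lemma pv_range_to_nat {σ : Type} (n : Nat) (body : σ → Int → σ) (init : σ) :
    (PySem.List.pyRange 0 ((n : Int) - 1) 1).foldl body init
      = (List.range (n - 1)).foldl (fun d (k : Nat) => body d (k : Int)) init := by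
  rw [PySem.List.pyRange_one]
  have h : ((n : Int) - 1 - 0).toNat = n - 1 := by omega
  rw [h, List.foldl_map]
  simp only [zero_add]

lemma pv_A_pairs (cs : List Char) (init : PySem.Dict Int Int) :
    (List.range (cs.length - 1)).foldl
      (fun d k => if cs.getD k ' ' = cs.getD (k + 1) ' ' then
          d.modify (pvDv (cs.getD k ' ')) 0 (· + pvDv (cs.getD k ' ')) else d) init
      = (cs.zip (cs.drop 1)).foldl
          (fun d p => if p.1 = p.2 then d.modify (pvDv p.1) 0 (· + pvDv p.1) else d) init :=
  pv_foldl_range_pairs (fun d a b => if a = b then d.modify (pvDv a) 0 (· + pvDv a) else d) cs init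

-- B's per-run contribution loop is the single-addition fold over the digits the runs stand for
lemma pv_runs_to_flat :
    ∀ (runs : List (Char × Nat)) (d : PySem.Dict Int Int),
    runs.foldl (fun d (p : Char × Nat) =>
        if 1 < p.2 then d.modify (pvDv p.1) 0 (· + ((p.2 : Int) - 1) * pvDv p.1) else d) d
      = (pvFlat runs).foldl pvOne d := by
  intro runs
  induction runs with
  | nil => intro d; rfl
  | cons p rest ih =>
    intro d
    rw [List.foldl_cons]
    have hflat : pvFlat (p :: rest) = List.replicate (p.2 - 1) (pvDv p.1) ++ pvFlat rest := by
      simp [pvFlat]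
    rw [hflat, List.foldl_append, ih]
    congr 1
    by_cases h : 1 < p.2
    · rw [if_pos h]
      obtain ⟨m, hm⟩ : ∃ m, p.2 - 1 = m + 1 := ⟨p.2 - 2, by omega⟩
      rw [hm, pv_one_replicate m d (pvDv p.1)]
      congr 1
      funext x
      have hc : ((m + 1 : Nat) : Int) = (p.2 : Int) - 1 := by omega
      rw [hc]
    · rw [if_neg h]
      have h0 : p.2 - 1 = 0 := by omega
      rw [h0, List.replicate_zero, List.foldl_nil]

-- B's initial dict comprehension is A's literal ten-key dict
lemma pv_d0_eq :
    (PySem.List.pyRange 0 10 1).foldl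
        (fun (d : PySem.Dict Int Int) k => d.insert k 0) (PySem.Dict.ofList [])
      = PySem.Dict.ofList [(0,0),(1,0),(2,0),(3,0),(4,0),(5,0),(6,0),(7,0),(8,0),(9,0)] := by
  decide

-- ===== VERDICT (by name: the statement is the Claim_ definition above) =====
theorem searchInts_spec : Claim_equal_searchInts := by
  intro s _ hpre
  obtain ⟨hne, _⟩ := hpre
  unfold Spec_searchInts searchInts searchInts_alt
  simp only []
  set cs := s.toList with hcs
  rw [pv_range_to_nat cs.length]
  simp only [← Nat.cast_add_one, PySem.List.pyGetD_natCast]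
  rw [pv_A_pairs, pv_foldl_guard, pv_d0_eq, pv_runs_to_flat]
  obtain ⟨c, rest, hcons⟩ := List.exists_cons_of_ne_nil hne
  have hruns : cs.foldl (fun (runs : List (Char × Nat)) c =>
      match runs.getLast? with
      | some (c0, n) => if c0 = c then runs.dropLast ++ [(c, n + 1)] else runs ++ [(c, 1)]
      | none => runs ++ [(c, 1)]) [] = pvMerge c 1 rest := by
    rw [hcons, List.foldl_cons]
    show List.foldl _ ([] ++ [(c, 1)]) rest = _
    rw [pv_runs_merge rest [] c 1, List.nil_append]
  rw [hruns, pv_flat_merge rest c 1 le_rfl, ← hcons]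
  simp [pvMp]
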